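-- pv_equiv track=rewrite | github.com/lgylgy1/EasySRC | filter_comment.py | _filter_html_comment
-- ===== SOURCE A (Python) =====
-- def _filter_html_comment(code: str) -> str:
--     """过滤 HTML 注释（<!-- -->，支持跨多行）"""
--     lines = code.split('\n')
--     result = []
--     in_comment = False  # 是否在 <!-- --> 注释中
--
--     for line in lines:
--         i = 0
--         n = len(line)
--         new_line = []
--
--         while i < n:
--             if in_comment:
--                 # 查找注释结束符 -->
--                 if i + 2 < n and line[i] == '-' and line[i+1] == '-' and line[i+2] == '>':
--                     in_comment = False
--                     i += 3  # 跳过 -->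
--                 else:
--                     i += 1
--             else:
--                 # 查找注释开始符 <!--
--                 if i + 3 < n and line[i] == '<' and line[i+1] == '!' and line[i+2] == '-' and line[i+3] == '-':
--                     in_comment = True
--                     i += 4  # 跳过 <!--
--                 else:
--                     new_line.append(line[i])
--                     i += 1
--
--         result.append(''.join(new_line))
--
--     return '\n'.join(result)
-- ===== SOURCE B (Python) =====
-- def _filter_html_comment(code: str) -> str:
--     """Strip <!-- --> comments by jumping marker-to-marker with str.find over the
--     whole text (no line split, no per-char loop); newlines inside comments are kept."""
--     out = []
--     rest = code
--     in_comment = False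
--     while True:
--         if in_comment:
--             j = rest.find('-->')
--             if j == -1:
--                 out.append('\n' * rest.count('\n'))
--                 break
--             out.append('\n' * rest[:j].count('\n'))
--             rest = rest[j + 3:]
--             in_comment = False
--         else:
--             j = rest.find('<!--')
--             if j == -1:
--                 out.append(rest)
--                 break
--             out.append(rest[:j])
--             rest = rest[j + 4:]
--             in_comment = True
--     return ''.join(out)
-- ===== Notes on version B (the rewrite author's own statement) =====
-- stated objective: faster
-- what changed: Instead of splitting into lines and scanning character by character with an in_comment automaton, B never splits: it jumps marker-to-marker over the whole text with str.find ('<!--' / '-->'), copying the text between markers in slices and emitting the newlines found inside comments.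
import Mathlib
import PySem

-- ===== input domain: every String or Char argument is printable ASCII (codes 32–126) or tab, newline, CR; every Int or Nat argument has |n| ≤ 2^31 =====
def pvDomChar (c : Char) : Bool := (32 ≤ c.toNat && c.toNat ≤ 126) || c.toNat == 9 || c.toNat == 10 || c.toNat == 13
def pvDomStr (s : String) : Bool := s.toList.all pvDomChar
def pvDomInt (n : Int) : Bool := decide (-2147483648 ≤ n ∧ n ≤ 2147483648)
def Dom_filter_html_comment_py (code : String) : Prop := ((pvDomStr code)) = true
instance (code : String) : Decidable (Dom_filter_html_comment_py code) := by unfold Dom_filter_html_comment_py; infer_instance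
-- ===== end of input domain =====

-- B strips <!-- --> comments by jumping marker-to-marker with find over the whole text
-- instead of A's per-line, per-character scan; objective: faster (constant factor).

-- ===== PORT A =====
-- A's inner `while i < n` loop: index recursion over the line, carrying the
-- in_comment flag and the collected new_line characters (acc).
def loopA (line : List Char) (n : Nat) (i : Nat) (acc : List Char) (inc : Bool) :
    Bool × List Char :=
  if i < n then
    if inc then
      if i + 2 < n ∧ line.getD i ' ' = '-' ∧ line.getD (i+1) ' ' = '-' ∧
          line.getD (i+2) ' ' = '>' then
        loopA line n (i+3) acc false
      else
        loopA line n (i+1) acc inc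
    else
      if i + 3 < n ∧ line.getD i ' ' = '<' ∧ line.getD (i+1) ' ' = '!' ∧
          line.getD (i+2) ' ' = '-' ∧ line.getD (i+3) ' ' = '-' then
        loopA line n (i+4) acc true
      else
        loopA line n (i+1) (acc ++ [line.getD i ' ']) inc
  else (inc, acc)
termination_by n - i

def filter_html_comment_py (code : String) : String :=
  let lines := PySem.Chars.splitOn code.toList ['\n']
  let r := lines.foldl
    (fun (st : Bool × List (List Char)) line =>
      let p := loopA line line.length 0 [] st.1
      (p.1, st.2 ++ [p.2])) (false, [])
  String.ofList (PySem.Chars.join ['\n'] r.2)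

-- ===== PORT B =====
-- Source B's while-True loop: recursion on the remaining text, jumping with find.
def goB (rest : List Char) (inc : Bool) : List Char :=
  if inc then
    let j := PySem.Chars.find rest ['-', '-', '>']
    if j = -1 then
      List.replicate (PySem.Chars.count rest ['\n']) '\n'
    else
      List.replicate (PySem.Chars.count (rest.take j.toNat) ['\n']) '\n' ++
        goB (rest.drop (j.toNat + 3)) false
  else
    let j := PySem.Chars.find rest ['<', '!', '-', '-']
    if j = -1 then
      rest
    else
      rest.take j.toNat ++ goB (rest.drop (j.toNat + 4)) true
termination_by rest.length
decreasing_by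
  · have h0 : 0 ≤ PySem.Chars.find rest ['-', '-', '>'] := by
      have := PySem.Chars.neg_one_le_find rest ['-', '-', '>']; omega
    have hp := (PySem.Chars.find_spec h0).1
    have := hp.length_le
    simp only [List.length_drop, List.length_cons, List.length_nil] at this ⊢
    omega
  · have h0 : 0 ≤ PySem.Chars.find rest ['<', '!', '-', '-'] := by
      have := PySem.Chars.neg_one_le_find rest ['<', '!', '-', '-']; omega
    have hp := (PySem.Chars.find_spec h0).1
    have := hp.length_le
    simp only [List.length_drop, List.length_cons, List.length_nil] at this ⊢
    omega

def filter_html_comment_py_alt (code : String) : String :=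
  String.ofList (goB code.toList false)

-- ===== PRECONDITION & SPEC =====
def Spec_filter_html_comment_py (code : String) (out : String) : Prop := out = filter_html_comment_py_alt code
instance (code : String) (out : String) : Decidable (Spec_filter_html_comment_py code out) := by unfold Spec_filter_html_comment_py; infer_instance

-- ===== CLAIM (what is proved, stated in full; the proofs are below) =====
def Claim_equal_filter_html_comment_py : Prop := ∀ (code : String), Dom_filter_html_comment_py code → Spec_filter_html_comment_py code (filter_html_comment_py code)

-- ===== LEMMAS AND PROOFS =====

def F : Bool → List Char → List Char
  | false, '<' :: '!' :: '-' :: '-' :: rest => F true rest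
  | false, c :: rest => c :: F false rest
  | false, [] => []
  | true, '-' :: '-' :: '>' :: rest => F false rest
  | true, '\n' :: rest => '\n' :: F true rest
  | true, _ :: rest => F true rest
  | true, [] => []

def mySplit (cur : List Char) : List Char → List (List Char)
  | [] => [cur]
  | c :: t => if c = '\n' then cur :: mySplit [] t else mySplit (cur ++ [c]) t

def procLines (b : Bool) : List (List Char) → Bool × List (List Char)
  | [] => (b, [])
  | l :: t =>
    let p := loopA l l.length 0 [] b
    let q := procLines p.1 t
    (q.1, p.2 :: q.2)

lemma prefix3_iff (a b c : Char) (xs : List Char) :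
    [a, b, c] <+: xs ↔ xs[0]? = some a ∧ xs[1]? = some b ∧ xs[2]? = some c := by
  rcases xs with _ | ⟨x0, _ | ⟨x1, _ | ⟨x2, t⟩⟩⟩ <;> (simp [List.cons_prefix_cons]; try tauto)

lemma prefix4_iff (a b c d : Char) (xs : List Char) :
    [a, b, c, d] <+: xs ↔
      xs[0]? = some a ∧ xs[1]? = some b ∧ xs[2]? = some c ∧ xs[3]? = some d := by
  rcases xs with _ | ⟨x0, _ | ⟨x1, _ | ⟨x2, _ | ⟨x3, t⟩⟩⟩⟩ <;>
    (simp [List.cons_prefix_cons]; try tauto)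

-- indexing into (l.drop i ++ rest)

lemma dropAppend_getElem? (l rest : List Char) (i k : Nat) (hi : i ≤ l.length) :
    (l.drop i ++ rest)[k]? =
      if h : i + k < l.length then some l[i + k] else rest[i + k - l.length]? := by
  by_cases h : i + k < l.length
  · rw [dif_pos h, List.getElem?_append_left (by simp; omega), List.getElem?_drop,
      List.getElem?_eq_getElem h]
  · rw [dif_neg h, List.getElem?_append_right (by simp; omega)]
    congr 1
    simp
    omega

lemma F_false_cons (c : Char) (t : List Char)
    (h : ¬ ['<', '!', '-', '-'] <+: (c :: t)) :
    F false (c :: t) = c :: F false t := by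
  rw [F.eq_def]
  split
  case h_1 => exact absurd (by simp_all [List.cons_prefix_cons]) h
  case h_2 hmark heq1 heq =>
    obtain ⟨rfl, rfl⟩ := List.cons.inj heq
    rfl
  all_goals simp_all

lemma F_true_cons (c : Char) (t : List Char)
    (h : ¬ ['-', '-', '>'] <+: (c :: t)) :
    F true (c :: t) = if c = '\n' then '\n' :: F true t else F true t := by
  rw [F.eq_def]
  split
  case h_4 => exact absurd (by simp_all [List.cons_prefix_cons]) h
  case h_5 heq1 heq =>
    obtain ⟨rfl, rfl⟩ := List.cons.inj heq
    simp
  case h_6 hmark hnl heq1 heq =>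
    obtain ⟨rfl, rfl⟩ := List.cons.inj heq
    simp
    exact hnl
  all_goals simp_all

-- when A's close test fires, the text ahead starts with the marker

lemma F_nil (b : Bool) : F b [] = [] := by cases b <;> rfl

lemma F_newline (b : Bool) (t : List Char) : F b ('\n' :: t) = '\n' :: F b t := by
  cases b
  · rw [F.eq_def]; split <;> simp_all [eq_comm]
  · rw [F.eq_def]; split <;> simp_all [eq_comm]

lemma F_false_take (j : Nat) (l : List Char) (hj : j ≤ l.length)
    (h : ∀ i < j, ¬ ['<', '!', '-', '-'] <+: l.drop i) :
    F false l = l.take j ++ F false (l.drop j) := by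
  induction j generalizing l with
  | zero => simp
  | succ j ih =>
    rcases l with _ | ⟨c, t⟩
    · simp at hj
    · rw [F_false_cons c t (by simpa using h 0 (by omega))]
      simp only [List.take_succ_cons, List.drop_succ_cons, List.cons_append]
      rw [ih t (by simpa using hj) (fun i hi => by simpa using h (i+1) (by omega))]

lemma F_true_take (j : Nat) (l : List Char) (hj : j ≤ l.length)
    (h : ∀ i < j, ¬ ['-', '-', '>'] <+: l.drop i) :
    F true l = List.replicate ((l.take j).count '\n') '\n' ++ F true (l.drop j) := by
  induction j generalizing l with
  | zero => simp
  | succ j ih =>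
    rcases l with _ | ⟨c, t⟩
    · simp at hj
    · rw [F_true_cons c t (by simpa using h 0 (by omega))]
      simp only [List.take_succ_cons, List.drop_succ_cons, List.count_cons]
      by_cases hc : c = '\n'
      · subst hc
        simp only [beq_self_eq_true, if_true]
        rw [ih t (by simpa using hj) (fun i hi => by simpa using h (i+1) (by omega))]
        simp [List.replicate_succ]
      · rw [if_neg hc]
        rw [ih t (by simpa using hj) (fun i hi => by simpa using h (i+1) (by omega))]
        simp [hc]

lemma countGo_nl : ∀ (fuel : Nat) (l : List Char) (acc : Nat), l.length ≤ fuel →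
    PySem.Chars.count.go ['\n'] fuel l acc = acc + l.count '\n' := by
  intro fuel
  induction fuel with
  | zero =>
    intro l acc h
    have hl : l = [] := List.eq_nil_of_length_eq_zero (Nat.le_zero.1 h)
    subst hl; rw [PySem.Chars.count.go] <;> simp
  | succ fuel ih =>
    intro l acc h
    rcases l with _ | ⟨c, t⟩
    · rw [PySem.Chars.count.go] <;> simp
    · rw [PySem.Chars.count.go]
      simp only [List.length_cons] at h
      by_cases hc : c = '\n'
      · subst hc
        simp [List.isPrefixOf, ih t (acc + 1) (by omega)]
        omega
      · have hpf : (['\n'] : List Char).isPrefixOf (c :: t) = false := by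
          simp [List.isPrefixOf]; exact fun hh => hc hh.symm
        rw [hpf]
        simp [ih t acc (by omega), List.count_cons]
        intro hh; exact absurd hh hc

lemma count_nl (l : List Char) : PySem.Chars.count l ['\n'] = l.count '\n' := by
  rw [PySem.Chars.count]
  simp [countGo_nl l.length l 0 (le_refl _)]

lemma splitGo_nl : ∀ (fuel : Nat) (l cur : List Char) (acc : List (List Char)),
    l.length < fuel →
    PySem.Chars.splitOn.go ['\n'] fuel l cur acc = acc.reverse ++ mySplit cur.reverse l := by
  intro fuel
  induction fuel with
  | zero => intro l cur acc h; omega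
  | succ fuel ih =>
    intro l cur acc h
    rcases l with _ | ⟨c, t⟩
    · rw [PySem.Chars.splitOn.go] <;> simp [mySplit]
    · rw [PySem.Chars.splitOn.go]
      simp only [List.length_cons] at h
      by_cases hc : c = '\n'
      · subst hc
        have hpf : (['\n'] : List Char).isPrefixOf ('\n' :: t) = true := by
          simp [List.isPrefixOf]
        rw [hpf]
        simp [mySplit, ih t [] (cur.reverse :: acc) (by omega)]
      · have hpf : (['\n'] : List Char).isPrefixOf (c :: t) = false := by
          simp [List.isPrefixOf]; exact fun hh => hc hh.symm
        rw [hpf]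
        simp only [Bool.false_eq_true, if_false]
        rw [ih t (c :: cur) acc (by omega)]
        simp [mySplit, hc]

lemma splitOn_nl (l : List Char) : PySem.Chars.splitOn l ['\n'] = mySplit [] l := by
  rw [PySem.Chars.splitOn]
  simpa using splitGo_nl (l.length + 1) l [] [] (by omega)

lemma mySplit_ne_nil : ∀ (l cur : List Char), mySplit cur l ≠ [] := by
  intro l
  induction l with
  | nil => intro cur; simp [mySplit]
  | cons c t ih =>
    intro cur
    by_cases hc : c = '\n' <;> simp [mySplit, hc, ih]

lemma join_mySplit : ∀ (l cur : List Char),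
    PySem.Chars.join ['\n'] (mySplit cur l) = cur ++ l := by
  intro l
  induction l with
  | nil => intro cur; simp [mySplit, PySem.Chars.join_singleton]
  | cons c t ih =>
    intro cur
    by_cases hc : c = '\n'
    · subst hc
      rw [mySplit, if_pos rfl]
      obtain ⟨p, ps, hps⟩ := List.exists_cons_of_ne_nil (mySplit_ne_nil t [])
      rw [hps, PySem.Chars.join_cons_cons, ← hps, ih []]
      simp
    · rw [mySplit, if_neg hc, ih (cur ++ [c])]
      simp

lemma mem_mySplit_no_nl : ∀ (l cur piece : List Char), ('\n' ∉ cur) →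
    piece ∈ mySplit cur l → '\n' ∉ piece := by
  intro l
  induction l with
  | nil => intro cur piece hc hp; simp [mySplit] at hp; subst hp; exact hc
  | cons c t ih =>
    intro cur piece hc hp
    by_cases hcc : c = '\n'
    · subst hcc
      rw [mySplit, if_pos rfl] at hp
      rcases List.mem_cons.1 hp with h | h
      · subst h; exact hc
      · exact ih [] piece (by simp) h
    · rw [mySplit, if_neg hcc] at hp
      exact ih (cur ++ [c]) piece (by simp [hc]; exact fun hh => hcc hh.symm) hp

lemma not_prefix_close (l rest : List Char) (i : Nat) (hi : i < l.length)
    (hr : rest = [] ∨ ∃ r, rest = '\n' :: r)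
    (hc : ¬ (i + 2 < l.length ∧ l.getD i ' ' = '-' ∧ l.getD (i+1) ' ' = '-' ∧
      l.getD (i+2) ' ' = '>')) :
    ¬ ['-', '-', '>'] <+: (l.drop i ++ rest) := by
  intro hp
  rw [prefix3_iff] at hp
  obtain ⟨h0, h1, h2⟩ := hp
  rw [dropAppend_getElem? l rest i 0 (by omega)] at h0
  rw [dropAppend_getElem? l rest i 1 (by omega)] at h1
  rw [dropAppend_getElem? l rest i 2 (by omega)] at h2
  by_cases h : i + 2 < l.length
  · rw [dif_pos h] at h2
    rw [dif_pos (by omega)] at h0 h1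
    apply hc
    refine ⟨h, ?_, ?_, ?_⟩ <;>
      rw [List.getD_eq_getElem _ _ (by omega)] <;> simp_all
  · -- fewer than 3 chars of l remain; the missing marker char must come from rest
    rcases hr with rfl | ⟨r, rfl⟩
    · -- rest = []: some index is out of range
      by_cases h1' : i + 1 < l.length
      · rw [dif_neg h] at h2; simp at h2
      · rw [dif_neg h1'] at h1; simp at h1
    · -- rest starts with '\n': the marker char there would be '\n'
      by_cases h1' : i + 1 < l.length
      · rw [dif_neg h] at h2
        rw [show i + 2 - l.length = 0 by omega] at h2
        simp at h2
      · rw [dif_neg h1'] at h1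
        rw [show i + 1 - l.length = 0 by omega] at h1
        simp at h1

lemma not_prefix_open (l rest : List Char) (i : Nat) (hi : i < l.length)
    (hr : rest = [] ∨ ∃ r, rest = '\n' :: r)
    (hc : ¬ (i + 3 < l.length ∧ l.getD i ' ' = '<' ∧ l.getD (i+1) ' ' = '!' ∧
      l.getD (i+2) ' ' = '-' ∧ l.getD (i+3) ' ' = '-')) :
    ¬ ['<', '!', '-', '-'] <+: (l.drop i ++ rest) := by
  intro hp
  rw [prefix4_iff] at hp
  obtain ⟨h0, h1, h2, h3⟩ := hp
  rw [dropAppend_getElem? l rest i 0 (by omega)] at h0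
  rw [dropAppend_getElem? l rest i 1 (by omega)] at h1
  rw [dropAppend_getElem? l rest i 2 (by omega)] at h2
  rw [dropAppend_getElem? l rest i 3 (by omega)] at h3
  by_cases h : i + 3 < l.length
  · rw [dif_pos h] at h3
    rw [dif_pos (by omega)] at h0 h1 h2
    apply hc
    refine ⟨h, ?_, ?_, ?_, ?_⟩ <;>
      rw [List.getD_eq_getElem _ _ (by omega)] <;> simp_all
  · rcases hr with rfl | ⟨r, rfl⟩
    · by_cases h1' : i + 1 < l.length
      · by_cases h2' : i + 2 < l.length
        · rw [dif_neg h] at h3; simp at h3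
        · rw [dif_neg h2'] at h2; simp at h2
      · rw [dif_neg h1'] at h1; simp at h1
    · by_cases h1' : i + 1 < l.length
      · by_cases h2' : i + 2 < l.length
        · rw [dif_neg h] at h3
          rw [show i + 3 - l.length = 0 by omega] at h3
          simp at h3
        · rw [dif_neg h2'] at h2
          rw [show i + 2 - l.length = 0 by omega] at h2
          simp at h2
      · rw [dif_neg h1'] at h1
        rw [show i + 1 - l.length = 0 by omega] at h1
        simp at h1

lemma drop_close (l : List Char) (i : Nat)
    (hc : i + 2 < l.length ∧ l.getD i ' ' = '-' ∧ l.getD (i+1) ' ' = '-' ∧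
      l.getD (i+2) ' ' = '>') :
    l.drop i = '-' :: '-' :: '>' :: l.drop (i+3) := by
  obtain ⟨h, h0, h1, h2⟩ := hc
  rw [List.getD_eq_getElem _ _ (by omega)] at h0 h1 h2
  rw [List.drop_eq_getElem_cons (by omega), List.drop_eq_getElem_cons (by omega),
    List.drop_eq_getElem_cons (by omega), h0, h1, h2]

lemma drop_open (l : List Char) (i : Nat)
    (hc : i + 3 < l.length ∧ l.getD i ' ' = '<' ∧ l.getD (i+1) ' ' = '!' ∧
      l.getD (i+2) ' ' = '-' ∧ l.getD (i+3) ' ' = '-') :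
    l.drop i = '<' :: '!' :: '-' :: '-' :: l.drop (i+4) := by
  obtain ⟨h, h0, h1, h2, h3⟩ := hc
  rw [List.getD_eq_getElem _ _ (by omega)] at h0 h1 h2 h3
  rw [List.drop_eq_getElem_cons (by omega), List.drop_eq_getElem_cons (by omega),
    List.drop_eq_getElem_cons (by omega), List.drop_eq_getElem_cons (by omega),
    h0, h1, h2, h3]

lemma loopA_base (l acc : List Char) (i : Nat) (b : Bool) (hi : ¬ i < l.length) :
    loopA l l.length i acc b = (b, acc) := by
  rw [loopA]
  rw [if_neg hi]

lemma loopA_acc : ∀ (k i : Nat) (l acc : List Char) (b : Bool), l.length - i ≤ k →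
    loopA l l.length i acc b =
      ((loopA l l.length i [] b).1, acc ++ (loopA l l.length i [] b).2) := by
  intro k
  induction k with
  | zero =>
    intro i l acc b hk
    have hi : ¬ i < l.length := by omega
    rw [loopA_base l acc i b hi, loopA_base l [] i b hi]
    simp
  | succ k ih =>
    intro i l acc b hk
    by_cases hi : i < l.length
    · conv_lhs => rw [loopA]
      conv_rhs => rw [loopA]
      rw [if_pos hi, if_pos hi]
      cases b
      · simp only [Bool.false_eq_true, if_false]
        split_ifs with hc
        · rw [ih (i+4) l acc true (by omega), ih (i+4) l [] true (by omega)]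
        · rw [ih (i+1) l (acc ++ [l.getD i ' ']) false (by omega),
            ih (i+1) l ([] ++ [l.getD i ' ']) false (by omega)]
          simp
      · simp only [if_true]
        split_ifs with hc
        · rw [ih (i+3) l acc false (by omega), ih (i+3) l [] false (by omega)]
        · rw [ih (i+1) l acc true (by omega), ih (i+1) l [] true (by omega)]
    · rw [loopA_base l acc i b hi, loopA_base l [] i b hi]
      simp

lemma loopA_F : ∀ (k i : Nat) (l : List Char) (b : Bool) (rest : List Char),
    l.length - i ≤ k → '\n' ∉ l → (rest = [] ∨ ∃ r, rest = '\n' :: r) →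
    F b (l.drop i ++ rest) =
      (loopA l l.length i [] b).2 ++ F (loopA l l.length i [] b).1 rest := by
  intro k
  induction k with
  | zero =>
    intro i l b rest hk hnl hr
    have hi : ¬ i < l.length := by omega
    rw [loopA_base l [] i b hi, List.drop_eq_nil_of_le (by omega)]
    simp
  | succ k ih =>
    intro i l b rest hk hnl hr
    by_cases hi : i < l.length
    · conv_rhs => rw [loopA]
      rw [if_pos hi]
      cases b
      · simp only [Bool.false_eq_true, if_false]
        split_ifs with hc
        · rw [drop_open l i hc]
          rw [show F false ('<' :: '!' :: '-' :: '-' :: l.drop (i+4) ++ rest) =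
              F true (l.drop (i+4) ++ rest) from by simp [F]]
          exact ih (i+4) l true rest (by omega) hnl hr
        · rw [List.drop_eq_getElem_cons hi, List.cons_append,
            F_false_cons _ _ (by
              have := not_prefix_open l rest i hi hr hc
              rwa [List.drop_eq_getElem_cons hi, List.cons_append] at this)]
          rw [ih (i+1) l false rest (by omega) hnl hr]
          rw [loopA_acc (l.length - (i+1)) (i+1) l ([] ++ [l.getD i ' ']) false (le_refl _)]
          rw [List.getD_eq_getElem _ _ hi]
          simp
      · simp only [if_true]
        split_ifs with hc
        · rw [drop_close l i hc]
          rw [show F true ('-' :: '-' :: '>' :: l.drop (i+3) ++ rest) =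
              F false (l.drop (i+3) ++ rest) from by simp [F]]
          exact ih (i+3) l false rest (by omega) hnl hr
        · rw [List.drop_eq_getElem_cons hi, List.cons_append,
            F_true_cons _ _ (by
              have := not_prefix_close l rest i hi hr hc
              rwa [List.drop_eq_getElem_cons hi, List.cons_append] at this)]
          rw [if_neg (by
            intro hh
            exact hnl (hh ▸ List.getElem_mem hi))]
          exact ih (i+1) l true rest (by omega) hnl hr
    · have hdrop : l.drop i = [] := List.drop_eq_nil_of_le (by omega)
      rw [loopA_base l [] i _ hi, hdrop]
      simp

lemma foldl_procLines : ∀ (lines : List (List Char)) (b : Bool) (acc : List (List Char)),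
    lines.foldl
      (fun (st : Bool × List (List Char)) line =>
        let p := loopA line line.length 0 [] st.1
        (p.1, st.2 ++ [p.2])) (b, acc) =
      ((procLines b lines).1, acc ++ (procLines b lines).2) := by
  intro lines
  induction lines with
  | nil => intro b acc; simp [procLines]
  | cons l t ih =>
    intro b acc
    simp only [List.foldl_cons, procLines, ih]
    simp

lemma procLines_ne_nil (b : Bool) (l : List Char) (t : List (List Char)) :
    (procLines b (l :: t)).2 ≠ [] := by
  simp [procLines]

lemma F_join : ∀ (lines : List (List Char)) (b : Bool),
    (∀ p ∈ lines, '\n' ∉ p) →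
    F b (PySem.Chars.join ['\n'] lines) =
      PySem.Chars.join ['\n'] (procLines b lines).2 := by
  intro lines
  induction lines with
  | nil => intro b h; simp [procLines, PySem.Chars.join_nil, F_nil]
  | cons l t ih =>
    intro b h
    rcases t with _ | ⟨l', t⟩
    · rw [PySem.Chars.join_singleton]
      have := loopA_F l.length 0 l b [] (by omega) (h l (by simp)) (Or.inl rfl)
      simp only [List.drop_zero, List.append_nil] at this
      rw [this, F_nil]
      simp [procLines, PySem.Chars.join_singleton]
    · rw [PySem.Chars.join_cons_cons]
      have hjoin : l ++ ['\n'] ++ PySem.Chars.join ['\n'] (l' :: t) =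
          l ++ ('\n' :: PySem.Chars.join ['\n'] (l' :: t)) := by simp
      rw [hjoin]
      have hstep := loopA_F l.length 0 l b ('\n' :: PySem.Chars.join ['\n'] (l' :: t))
        (by omega) (h l (by simp)) (Or.inr ⟨_, rfl⟩)
      simp only [List.drop_zero] at hstep
      rw [hstep, F_newline, ih _ (fun p hp => h p (by simp [hp]))]
      obtain ⟨q, qs, hq⟩ := List.exists_cons_of_ne_nil
        (procLines_ne_nil (loopA l l.length 0 [] b).1 l' t)
      show (loopA l l.length 0 [] b).2 ++
          ('\n' :: PySem.Chars.join ['\n'] (procLines (loopA l l.length 0 [] b).1 (l' :: t)).2) =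
        PySem.Chars.join ['\n'] (procLines b (l :: l' :: t)).2
      rw [show (procLines b (l :: l' :: t)).2 =
          (loopA l l.length 0 [] b).2 :: (procLines (loopA l l.length 0 [] b).1 (l' :: t)).2
          from rfl]
      rw [hq, PySem.Chars.join_cons_cons]
      simp

lemma no_prefix_of_find_neg (l sub : List Char) (h : PySem.Chars.find l sub = -1) :
    ∀ i, ¬ sub <+: l.drop i := by
  intro i hp
  have hin : PySem.Chars.isIn sub l = true :=
    (PySem.Chars.exists_prefix_drop_iff_isIn sub l).1 ⟨i, hp⟩
  have hinf := (PySem.Chars.isIn_iff_infix sub l).1 hin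
  exact ((PySem.Chars.find_eq_neg_one_iff l sub).1 h) hinf

lemma F_false_all (l : List Char) (h : ∀ i, ¬ ['<', '!', '-', '-'] <+: l.drop i) :
    F false l = l := by
  have := F_false_take l.length l (le_refl _) (fun i _ => h i)
  simpa [F_nil] using this

lemma F_true_all (l : List Char) (h : ∀ i, ¬ ['-', '-', '>'] <+: l.drop i) :
    F true l = List.replicate (l.count '\n') '\n' := by
  have := F_true_take l.length l (le_refl _) (fun i _ => h i)
  simpa [F_nil] using this

lemma goB_eq_F : ∀ (n : Nat) (l : List Char), l.length ≤ n → ∀ b, goB l b = F b l := by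
  intro n
  induction n with
  | zero =>
    intro l hl b
    have hnil : l = [] := List.eq_nil_of_length_eq_zero (Nat.le_zero.1 hl)
    subst hnil
    rw [goB]
    have h1 : PySem.Chars.find [] ['-', '-', '>'] = -1 :=
      (PySem.Chars.find_eq_neg_one_iff _ _).2 (by simp)
    have h2 : PySem.Chars.find [] ['<', '!', '-', '-'] = -1 :=
      (PySem.Chars.find_eq_neg_one_iff _ _).2 (by simp)
    cases b <;> simp [h1, h2, F_nil, count_nl]
  | succ n ih =>
    intro l hl b
    rw [goB]
    cases b
    · simp only [Bool.false_eq_true, if_false]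
      by_cases hj : PySem.Chars.find l ['<', '!', '-', '-'] = -1
      · rw [if_pos hj, F_false_all l (no_prefix_of_find_neg l _ hj)]
      · rw [if_neg hj]
        have h0 : 0 ≤ PySem.Chars.find l ['<', '!', '-', '-'] := by
          have := PySem.Chars.neg_one_le_find l ['<', '!', '-', '-']; omega
        obtain ⟨hpre, hmin⟩ := PySem.Chars.find_spec h0
        have hlen : (PySem.Chars.find l ['<', '!', '-', '-']).toNat ≤ l.length := by
          have := PySem.Chars.find_le_length l ['<', '!', '-', '-']; omega
        set j := (PySem.Chars.find l ['<', '!', '-', '-']).toNat with hjdef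
        obtain ⟨t, ht⟩ := hpre
        have hlen4 : j + 4 + t.length ≤ l.length := by
          have h1 : (l.drop j).length = l.length - j := by simp
          rw [← ht] at h1; simp at h1; omega
        have hdt : l.drop (j + 4) = t := by
          rw [← List.drop_drop, ← ht]; simp
        rw [F_false_take j l hlen (fun i hi => hmin i hi)]
        rw [show l.drop j = '<' :: '!' :: '-' :: '-' :: t from ht.symm]
        rw [show F false ('<' :: '!' :: '-' :: '-' :: t) = F true t from by simp [F]]
        rw [hdt, ih t (by omega) true]
    · simp only [if_true]
      by_cases hj : PySem.Chars.find l ['-', '-', '>'] = -1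
      · rw [if_pos hj, F_true_all l (no_prefix_of_find_neg l _ hj), count_nl]
      · rw [if_neg hj]
        have h0 : 0 ≤ PySem.Chars.find l ['-', '-', '>'] := by
          have := PySem.Chars.neg_one_le_find l ['-', '-', '>']; omega
        obtain ⟨hpre, hmin⟩ := PySem.Chars.find_spec h0
        have hlen : (PySem.Chars.find l ['-', '-', '>']).toNat ≤ l.length := by
          have := PySem.Chars.find_le_length l ['-', '-', '>']; omega
        set j := (PySem.Chars.find l ['-', '-', '>']).toNat with hjdef
        obtain ⟨t, ht⟩ := hpre
        have hlen3 : j + 3 + t.length ≤ l.length := by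
          have h1 : (l.drop j).length = l.length - j := by simp
          rw [← ht] at h1; simp at h1; omega
        have hdt : l.drop (j + 3) = t := by
          rw [← List.drop_drop, ← ht]; simp
        rw [F_true_take j l hlen (fun i hi => hmin i hi), count_nl]
        rw [show l.drop j = '-' :: '-' :: '>' :: t from ht.symm]
        rw [show F true ('-' :: '-' :: '>' :: t) = F false t from by simp [F]]
        rw [hdt, ih t (by omega) false]

-- ===== VERDICT (by name: the statement is the Claim_ definition above) =====
theorem filter_html_comment_py_spec : Claim_equal_filter_html_comment_py := by
  intro code _
  unfold Spec_filter_html_comment_py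
  unfold filter_html_comment_py filter_html_comment_py_alt
  simp only [splitOn_nl]
  rw [foldl_procLines (mySplit [] code.toList) false []]
  show String.ofList (PySem.Chars.join ['\n'] (procLines false (mySplit [] code.toList)).2) =
    String.ofList (goB code.toList false)
  rw [← F_join (mySplit [] code.toList) false
    (fun p hp => mem_mySplit_no_nl code.toList [] p (by simp) hp)]
  rw [join_mySplit code.toList []]
  rw [goB_eq_F code.toList.length code.toList (le_refl _) false]
  simp
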